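-- pv_equiv track=rewrite | github.com/OmAvhad/dementia | server/run.py | direct
-- ===== SOURCE A (Python) =====
-- def direct(segment):
--     l=[]
--
--     for i in range(len(segment)):
--         f=0
--         g=0
--
--         n=len(segment[i])
--         for j in range(n-1):
--             for k in range(j+1,n):
--                 if segment[i][j]==segment[i][k]:
--                     l.append(0)
--                     f=1
--                     g=1
--                 if g==1:
--                     break
--             if g==1:
--                 break
--         if f==0:
--             l.append(1)
--
--     return l
-- ===== SOURCE B (Python) =====
-- def direct(segment):
--     out = []
--     for seg in segment:
--         seen = set()
--         flag = 1
--         for x in seg: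
--             if x in seen:
--                 flag = 0
--                 break
--             seen.add(x)
--         out.append(flag)
--     return out
-- ===== Notes on version B (the rewrite author's own statement) =====
-- stated objective: faster
-- what changed: Replaced the O(n^2) nested index-pair scan with break flags by a single pass per segment that records seen elements in a hash set and stops at the first repeat.
import Mathlib
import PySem

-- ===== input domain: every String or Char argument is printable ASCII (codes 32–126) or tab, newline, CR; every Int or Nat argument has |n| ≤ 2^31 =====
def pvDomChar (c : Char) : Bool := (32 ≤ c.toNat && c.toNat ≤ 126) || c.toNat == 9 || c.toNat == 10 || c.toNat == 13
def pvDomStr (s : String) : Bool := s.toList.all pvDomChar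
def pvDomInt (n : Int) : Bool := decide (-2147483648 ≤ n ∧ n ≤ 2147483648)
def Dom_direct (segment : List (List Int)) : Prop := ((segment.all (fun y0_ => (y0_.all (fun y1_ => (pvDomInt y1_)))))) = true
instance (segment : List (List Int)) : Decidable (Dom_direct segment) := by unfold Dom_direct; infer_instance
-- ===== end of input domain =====

-- B replaces A's O(n^2) nested index-pair scan per segment by one linear pass with a seen-set (asymptotically faster).

-- ===== PORT A =====
-- inner 'for k in range(j+1, n)' loop; state is (l, f, g), break when g == 1
def kloopA (seg : List Int) (j : Int) : List Int → (List Int × Int × Int) → (List Int × Int × Int)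
  | [], st => st
  | k :: ks, (l, f, g) =>
    let st :=
      if PySem.List.pyGetD seg j 0 = PySem.List.pyGetD seg k 0 then (l ++ [0], 1, 1) else (l, f, g)
    if st.2.2 = 1 then st else kloopA seg j ks st

-- middle 'for j in range(n-1)' loop; break when g == 1
def jloopA (seg : List Int) : List Int → (List Int × Int × Int) → (List Int × Int × Int)
  | [], st => st
  | j :: js, st =>
    let st' := kloopA seg j (PySem.List.pyRange (j + 1) (seg.length : Int) 1) st
    if st'.2.2 = 1 then st' else jloopA seg js st'

def direct (segment : List (List Int)) : List Int :=
  (PySem.List.pyRange 0 (segment.length : Int) 1).foldl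
    (fun l i =>
      let seg := PySem.List.pyGetD segment i []
      let n : Int := seg.length
      let st := jloopA seg (PySem.List.pyRange 0 (n - 1) 1) (l, 0, 0)
      if st.2.1 = 0 then st.1 ++ [1] else st.1)
    []

-- ===== PORT B =====
-- one pass over the segment with a seen-set; stop with 0 at the first repeat, else 1
def flagB : List Int → PySem.Set Int → Int
  | [], _ => 1
  | x :: xs, seen =>
    if PySem.Set.contains seen x then 0 else flagB xs (PySem.Set.add seen x)

def direct_alt (segment : List (List Int)) : List Int :=
  segment.foldl (fun out seg => out ++ [flagB seg PySem.Set.empty]) []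

-- ===== PRECONDITION & SPEC =====
def Spec_direct (segment : List (List Int)) (out : List Int) : Prop := out = direct_alt segment
instance (segment : List (List Int)) (out : List Int) : Decidable (Spec_direct segment out) := by unfold Spec_direct; infer_instance

-- ===== CLAIM (what is proved, stated in full; the proofs are below) =====
def Claim_equal_direct : Prop := ∀ (segment : List (List Int)), Dom_direct segment → Spec_direct segment (direct segment)

-- ===== LEMMAS AND PROOFS =====

theorem flagB_char (xs : List Int) (seen : PySem.Set Int) :
    flagB xs seen = if xs.Nodup ∧ ∀ x ∈ xs, x ∉ seen then 1 else 0 := by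
  induction xs generalizing seen with
  | nil => simp [flagB]
  | cons x xs ih =>
    by_cases hx : x ∈ seen
    · have hc : PySem.Set.contains seen x = true := (PySem.Set.contains_iff seen x).mpr hx
      simp [flagB, hx]
    · have hc : PySem.Set.contains seen x = false := by
        rw [Bool.eq_false_iff]
        intro h; exact hx ((PySem.Set.contains_iff seen x).mp h)
      simp only [flagB, hc, Bool.false_eq_true, if_false, ih, List.nodup_cons]
      apply if_congr _ rfl rfl
      simp only [PySem.Set.mem_add, List.mem_cons]
      constructor
      · rintro ⟨hn, hall⟩
        refine ⟨⟨fun hmem => (hall x hmem) (Or.inr rfl), hn⟩, ?_⟩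
        rintro y (rfl | hy)
        · exact hx
        · exact fun hs => hall y hy (Or.inl hs)
      · rintro ⟨⟨hxn, hn⟩, hall⟩
        refine ⟨hn, fun y hy => ?_⟩
        rintro (hs | rfl)
        · exact hall y (Or.inr hy) hs
        · exact hxn hy

theorem kloopA_char (seg : List Int) (j : Int) (ks : List Int) (l : List Int) :
    kloopA seg j ks (l, 0, 0) =
      if ∃ k ∈ ks, PySem.List.pyGetD seg j 0 = PySem.List.pyGetD seg k 0
      then (l ++ [0], 1, 1) else (l, 0, 0) := by
  induction ks with
  | nil => simp [kloopA]
  | cons k ks ih =>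
    by_cases h : PySem.List.pyGetD seg j 0 = PySem.List.pyGetD seg k 0
    · simp [kloopA, h]
    · simp [kloopA, h, ih]

theorem jloopA_char (seg : List Int) (js : List Int) (l : List Int) :
    jloopA seg js (l, 0, 0) =
      if ∃ j ∈ js, ∃ k ∈ PySem.List.pyRange (j + 1) (seg.length : Int) 1,
          PySem.List.pyGetD seg j 0 = PySem.List.pyGetD seg k 0
      then (l ++ [0], 1, 1) else (l, 0, 0) := by
  induction js with
  | nil => simp [jloopA]
  | cons j js ih =>
    by_cases h : ∃ k ∈ PySem.List.pyRange (j + 1) (seg.length : Int) 1,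
        PySem.List.pyGetD seg j 0 = PySem.List.pyGetD seg k 0
    · have hmem : ∃ j' ∈ j :: js, ∃ k ∈ PySem.List.pyRange (j' + 1) (seg.length : Int) 1,
          PySem.List.pyGetD seg j' 0 = PySem.List.pyGetD seg k 0 := ⟨j, List.mem_cons_self .., h⟩
      simp only [jloopA, kloopA_char, if_pos h, if_pos hmem]
      norm_num
    · simp only [jloopA, kloopA_char, if_neg h]
      norm_num
      rw [ih]
      apply if_congr _ rfl rfl
      simp only [List.mem_cons]
      constructor
      · rintro ⟨a, ha, hk⟩; exact ⟨a, Or.inr ha, hk⟩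
      · rintro ⟨a, ha, hk⟩
        rcases ha with rfl | ha
        · exact absurd hk h
        · exact ⟨a, ha, hk⟩

theorem dup_iff_not_nodup (seg : List Int) :
    (∃ j ∈ PySem.List.pyRange 0 ((seg.length : Int) - 1) 1,
      ∃ k ∈ PySem.List.pyRange (j + 1) (seg.length : Int) 1,
        PySem.List.pyGetD seg j 0 = PySem.List.pyGetD seg k 0) ↔ ¬ seg.Nodup := by
  constructor
  · rintro ⟨j, hj, k, hk, heq⟩ hnd
    rw [PySem.List.mem_pyRange_one] at hj hk
    have h1 : (0:Int) ≤ j := hj.1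
    have h2 : j < (seg.length : Int) := by omega
    have h3 : (0:Int) ≤ k := by omega
    have h4 : k < (seg.length : Int) := hk.2
    rw [PySem.List.pyGetD_eq_getElem seg 0 h1 h2,
        PySem.List.pyGetD_eq_getElem seg 0 h3 h4] at heq
    have hji : j.toNat < seg.length := by omega
    have hki : k.toNat < seg.length := by omega
    have := (List.Nodup.getElem_inj_iff hnd (hi := hji) (hj := hki)).mp heq
    omega
  · intro hnd
    by_contra hno
    apply hnd
    rw [List.nodup_iff_getElem?_ne_getElem?]
    intro i j hij hjlen heq
    apply hno
    have hilen : i < seg.length := lt_trans hij hjlen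
    rw [List.getElem?_eq_getElem hilen, List.getElem?_eq_getElem hjlen] at heq
    refine ⟨(i : Int), ?_, (j : Int), ?_, ?_⟩
    · rw [PySem.List.mem_pyRange_one]; omega
    · rw [PySem.List.mem_pyRange_one]; omega
    · rw [PySem.List.pyGetD_eq_getElem seg (i := (i:Int)) 0 (by omega) (by omega),
          PySem.List.pyGetD_eq_getElem seg (i := (j:Int)) 0 (by omega) (by omega)]
      simpa using Option.some.inj heq

theorem segStep (seg : List Int) (l : List Int) :
    (let n : Int := seg.length
     let st := jloopA seg (PySem.List.pyRange 0 (n - 1) 1) (l, 0, 0)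
     if st.2.1 = 0 then st.1 ++ [1] else st.1) = l ++ [flagB seg PySem.Set.empty] := by
  simp only [jloopA_char, flagB_char]
  by_cases h : ∃ j ∈ PySem.List.pyRange 0 ((seg.length : Int) - 1) 1,
      ∃ k ∈ PySem.List.pyRange (j + 1) (seg.length : Int) 1,
        PySem.List.pyGetD seg j 0 = PySem.List.pyGetD seg k 0
  · have hnd : ¬ seg.Nodup := (dup_iff_not_nodup seg).mp h
    simp only [if_pos h]
    simp [hnd]
  · have hnd : seg.Nodup := not_not.mp (fun hn => h ((dup_iff_not_nodup seg).mpr hn))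
    simp only [if_neg h]
    simp [hnd]

-- ===== VERDICT (by name: the statement is the Claim_ definition above) =====
theorem direct_spec : Claim_equal_direct := by
  intro segment _
  show direct segment = direct_alt segment
  unfold direct direct_alt
  rw [PySem.List.foldl_pyRange_zero_pyGetD' segment []
    (fun l seg =>
      let n : Int := seg.length
      let st := jloopA seg (PySem.List.pyRange 0 (n - 1) 1) (l, 0, 0)
      if st.2.1 = 0 then st.1 ++ [1] else st.1) []]
  apply PySem.List.foldl_congr_mem
  intro acc x _
  exact segStep x acc
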